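-- pv_equiv track=rewrite | github.com/realmegasteve/wareraNL-bot | services/country_utils.py | find_country
-- ===== SOURCE A (Python) =====
-- def find_country(query: str, country_list: list[dict]) -> dict | None:
--     """Find a country by code or name (case-insensitive).
--
--     Matching priority:
--       1. Exact code match  (e.g. "NL", "CH")
--       2. Exact name match  (e.g. "Netherlands", "Switzerland")
--       3. Name starts-with  (e.g. "switz" → Switzerland)
--     """
--     q = query.strip().lower()
--     hit = next((c for c in country_list if str(c.get("code", "")).lower() == q), None)
--     if hit:
--         return hit
--     hit = next((c for c in country_list if str(c.get("name", "")).lower() == q), None)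
--     if hit:
--         return hit
--     return next((c for c in country_list if str(c.get("name", "")).lower().startswith(q)), None)
-- ===== SOURCE B (Python) =====
-- def find_country(query: str, country_list: list[dict]) -> dict | None:
--     """One pass over country_list recording the first hit of each priority
--     tier, instead of three separate scans."""
--     q = query.strip().lower()
--     code_hit = name_hit = prefix_hit = None
--     for c in country_list:
--         code = str(c.get("code", "")).lower()
--         name = str(c.get("name", "")).lower()
--         if code_hit is None and code == q:
--             code_hit = c
--         if name_hit is None and name == q:
--             name_hit = c
--         if prefix_hit is None and name.startswith(q):
--             prefix_hit = c
--     return code_hit or name_hit or prefix_hit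
-- ===== Notes on version B (the rewrite author's own statement) =====
-- stated objective: alternative
-- what changed: Single pass over country_list recording the first hit of each priority tier (code/name/prefix), combined with an or-chain, instead of three separate next(...) scans of the whole list.
import Mathlib
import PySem

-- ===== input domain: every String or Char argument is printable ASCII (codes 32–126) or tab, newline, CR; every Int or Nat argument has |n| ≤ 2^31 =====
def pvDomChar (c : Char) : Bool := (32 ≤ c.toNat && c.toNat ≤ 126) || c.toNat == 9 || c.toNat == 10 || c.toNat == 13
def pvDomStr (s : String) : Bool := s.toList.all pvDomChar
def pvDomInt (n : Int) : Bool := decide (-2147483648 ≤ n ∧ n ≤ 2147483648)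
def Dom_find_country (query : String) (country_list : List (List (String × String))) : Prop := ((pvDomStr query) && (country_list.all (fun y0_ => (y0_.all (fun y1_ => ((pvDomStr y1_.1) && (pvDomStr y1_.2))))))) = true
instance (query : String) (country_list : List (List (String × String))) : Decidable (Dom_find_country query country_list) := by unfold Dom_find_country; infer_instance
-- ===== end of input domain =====

-- B does one pass recording the first hit of each priority tier instead of A's three scans; same return value, no speed claim.
-- ===== PORT A =====
-- c.get(k, dflt) on an association-list dict (first match wins).
def pvGetD (c : List (String × String)) (k dflt : String) : String :=
  PySem.Dict.getD (PySem.Dict.mk c) k dflt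

-- Python truthiness of `hit` (None or a dict): false iff None or the empty dict.
def pvTruthy (o : Option (List (String × String))) : Bool :=
  match o with
  | none => false
  | some c => !c.isEmpty

def find_country (query : String) (country_list : List (List (String × String))) : Option (List (String × String)) :=
  let q := PySem.Str.lower (PySem.Str.strip query)
  let hit := country_list.find? (fun c => PySem.Str.lower (pvGetD c "code" "") == q)
  if pvTruthy hit then hit else
  let hit := country_list.find? (fun c => PySem.Str.lower (pvGetD c "name" "") == q)
  if pvTruthy hit then hit else
  country_list.find? (fun c => PySem.Str.startswith (PySem.Str.lower (pvGetD c "name" "")) q)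

-- ===== PORT B =====
-- `x or y` on dict-or-None values: y unless x is truthy.
def pvOr (a b : Option (List (String × String))) : Option (List (String × String)) :=
  if pvTruthy a then a else b

def find_country_alt (query : String) (country_list : List (List (String × String))) : Option (List (String × String)) :=
  let q := PySem.Str.lower (PySem.Str.strip query)
  let st := country_list.foldl (fun (s : Option (List (String × String)) × Option (List (String × String)) × Option (List (String × String))) c =>
      let code := PySem.Str.lower (pvGetD c "code" "")
      let name := PySem.Str.lower (pvGetD c "name" "")
      let s1 := if s.1.isNone && (code == q) then some c else s.1
      let s2 := if s.2.1.isNone && (name == q) then some c else s.2.1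
      let s3 := if s.2.2.isNone && PySem.Str.startswith name q then some c else s.2.2
      (s1, s2, s3)) (none, none, none)
  pvOr st.1 (pvOr st.2.1 st.2.2)

-- ===== PRECONDITION & SPEC =====
def Spec_find_country (query : String) (country_list : List (List (String × String))) (out : Option (List (String × String))) : Prop := out = find_country_alt query country_list
instance (query : String) (country_list : List (List (String × String))) (out : Option (List (String × String))) : Decidable (Spec_find_country query country_list out) := by unfold Spec_find_country; infer_instance

-- ===== CLAIM (what is proved, stated in full; the proofs are below) =====
def Claim_equal_find_country : Prop := ∀ (query : String) (country_list : List (List (String × String))), Dom_find_country query country_list → Spec_find_country query country_list (find_country query country_list)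

-- ===== LEMMAS AND PROOFS =====

-- ===== VERDICT (by name: the statement is the Claim_ definition above) =====
-- A fold over an independent triple is the triple of the independent folds.
theorem foldl_prod3 {α β : Type} (f1 f2 f3 : Option β → α → Option β) :
    ∀ (l : List α) (a b c : Option β),
    l.foldl (fun (s : Option β × Option β × Option β) x => (f1 s.1 x, f2 s.2.1 x, f3 s.2.2 x)) (a, b, c)
      = (l.foldl f1 a, l.foldl f2 b, l.foldl f3 c) := by
  intro l
  induction l with
  | nil => intro a b c; rfl
  | cons x xs ih => intro a b c; simp only [List.foldl_cons]; exact ih _ _ _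

-- The "record the first match once" fold is `Option.or` of the first match.
theorem foldl_first_fill {α : Type} (p : α → Bool) :
    ∀ (l : List α) (a : Option α),
    l.foldl (fun s c => if s.isNone && p c then some c else s) a = a.or (l.find? p) := by
  intro l
  induction l with
  | nil => intro a; cases a <;> rfl
  | cons x xs ih =>
    intro a
    rw [List.foldl_cons, List.find?_cons]
    cases a with
    | some v =>
      have h : (if (some v).isNone && p x then some x else some v) = some v := by simp
      rw [h, ih]
      cases p x <;> rfl
    | none =>
      cases hp : p x with
      | true =>
        have h : (if ((none : Option α).isNone && true) = true then some x else none) = some x := rfl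
        rw [h, ih]
        rfl
      | false =>
        have h : (if ((none : Option α).isNone && false) = true then some x else none) = none := rfl
        rw [h, ih]

-- The specialised triple fold of B's loop, componentwise.
theorem fold_triple (q : String) (l : List (List (String × String))) :
    l.foldl (fun (s : Option (List (String × String)) × Option (List (String × String)) × Option (List (String × String))) c =>
      (if s.1.isNone && (PySem.Str.lower (pvGetD c "code" "") == q) then some c else s.1,
       if s.2.1.isNone && (PySem.Str.lower (pvGetD c "name" "") == q) then some c else s.2.1,
       if s.2.2.isNone && PySem.Str.startswith (PySem.Str.lower (pvGetD c "name" "")) q then some c else s.2.2))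
      (none, none, none)
    = (l.find? (fun c => PySem.Str.lower (pvGetD c "code" "") == q),
       l.find? (fun c => PySem.Str.lower (pvGetD c "name" "") == q),
       l.find? (fun c => PySem.Str.startswith (PySem.Str.lower (pvGetD c "name" "")) q)) := by
  rw [foldl_prod3
        (fun s c => if s.isNone && (PySem.Str.lower (pvGetD c "code" "") == q) then some c else s)
        (fun s c => if s.isNone && (PySem.Str.lower (pvGetD c "name" "") == q) then some c else s)
        (fun s c => if s.isNone && PySem.Str.startswith (PySem.Str.lower (pvGetD c "name" "")) q then some c else s)]
  rw [foldl_first_fill, foldl_first_fill, foldl_first_fill]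
  rfl

theorem find_country_spec : Claim_equal_find_country := by
  intro query country_list _
  unfold Spec_find_country find_country find_country_alt
  simp only [fold_triple]
  rfl
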